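-- pv_equiv track=rewrite | github.com/0xMashiro/LeetCode.cpp | script/leetcode/core.py | _split_parameters
-- ===== SOURCE A (Python) =====
-- from typing import Optional, Tuple, List, Set
--
-- def _split_parameters(params_str: str) -> List[str]:
--     """分割参数列表，处理嵌套模板"""
--     params = []
--     current = []
--     depth = 0
--
--     for char in params_str:
--         if char == '<':
--             depth += 1
--             current.append(char)
--         elif char == '>':
--             depth -= 1
--             current.append(char)
--         elif char == ',' and depth == 0:
--             params.append(''.join(current))
--             current = []
--         else:
--             current.append(char)
--
--     if current:
--         params.append(''.join(current))
--
--     return params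
-- ===== SOURCE B (Python) =====
-- def _split_parameters(params_str: str):
--     """Two-pass: record top-level comma indices, then slice the string."""
--     idxs = []
--     depth = 0
--     for i, ch in enumerate(params_str):
--         if ch == '<':
--             depth += 1
--         elif ch == '>':
--             depth -= 1
--         elif ch == ',' and depth == 0:
--             idxs.append(i)
--     parts = []
--     start = 0
--     for i in idxs:
--         parts.append(params_str[start:i])
--         start = i + 1
--     last = params_str[start:]
--     if last:
--         parts.append(last)
--     return parts
-- ===== Notes on version B (the rewrite author's own statement) =====
-- stated objective: alternative
-- what changed: Replaces A's per-character accumulation buffer with a two-pass scheme: first collect the indices of top-level commas, then slice the string between consecutive indices (final slice appended only if non-empty).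
import Mathlib
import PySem

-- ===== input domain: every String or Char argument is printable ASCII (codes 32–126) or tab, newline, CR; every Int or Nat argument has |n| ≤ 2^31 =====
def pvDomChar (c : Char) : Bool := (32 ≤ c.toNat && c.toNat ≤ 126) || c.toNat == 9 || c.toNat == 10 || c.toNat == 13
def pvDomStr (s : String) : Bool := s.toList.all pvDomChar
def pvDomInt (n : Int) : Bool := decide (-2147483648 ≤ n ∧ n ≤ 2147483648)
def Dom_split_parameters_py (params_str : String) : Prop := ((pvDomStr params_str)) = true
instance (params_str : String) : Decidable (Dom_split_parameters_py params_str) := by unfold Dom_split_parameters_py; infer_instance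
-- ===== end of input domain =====

-- B replaces A's character-accumulation buffer with index collection plus slicing (alternative decomposition, same O(n) cost).

-- ===== PORT A =====
-- literal transliteration of A: one fold carrying (params, current, depth); ''.join(current) = String.mk
def split_parameters_py (params_str : String) : List String :=
  let st := params_str.toList.foldl
    (fun (st : List (List Char) × List Char × Int) c =>
      if c = '<' then (st.1, st.2.1 ++ [c], st.2.2 + 1)
      else if c = '>' then (st.1, st.2.1 ++ [c], st.2.2 - 1)
      else if c = ',' ∧ st.2.2 = 0 then (st.1 ++ [st.2.1], [], st.2.2)
      else (st.1, st.2.1 ++ [c], st.2.2))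
    ([], [], 0)
  (if st.2.1 ≠ [] then st.1 ++ [st.2.1] else st.1).map String.mk

-- ===== PORT B =====
-- transliteration of Source B: pass 1 folds over enumerate collecting top-level comma indices;
-- pass 2 folds over those indices slicing the char list (PySem.List.slice is exact Python slicing).
def split_parameters_py_alt (params_str : String) : List String :=
  let cs := params_str.toList
  let st := (PySem.List.enumerate cs 0).foldl
    (fun (st : List Int × Int) (p : Int × Char) =>
      if p.2 = '<' then (st.1, st.2 + 1)
      else if p.2 = '>' then (st.1, st.2 - 1)
      else if p.2 = ',' ∧ st.2 = 0 then (st.1 ++ [p.1], st.2)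
      else st)
    ([], 0)
  let fin := st.1.foldl
    (fun (acc : List (List Char) × Int) i =>
      (acc.1 ++ [PySem.List.slice cs (some acc.2) (some i)], i + 1))
    ([], 0)
  let last := PySem.List.slice cs (some fin.2) none
  (if last ≠ [] then fin.1 ++ [last] else fin.1).map String.mk

-- ===== PRECONDITION & SPEC =====
def Spec_split_parameters_py (params_str : String) (out : List String) : Prop := out = split_parameters_py_alt params_str
instance (params_str : String) (out : List String) : Decidable (Spec_split_parameters_py params_str out) := by unfold Spec_split_parameters_py; infer_instance

-- ===== CLAIM (what is proved, stated in full; the proofs are below) =====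
def Claim_equal_split_parameters_py : Prop := ∀ (params_str : String), Dom_split_parameters_py params_str → Spec_split_parameters_py params_str (split_parameters_py params_str)

-- ===== LEMMAS AND PROOFS =====

-- direct recursive splitter: the common reference both ports are reduced to
def fsplit : List Char → Int → List Char → List (List Char)
  | [], _, cur => if cur = [] then [] else [cur]
  | c :: cs, d, cur =>
    if c = '<' then fsplit cs (d+1) (cur ++ [c])
    else if c = '>' then fsplit cs (d-1) (cur ++ [c])
    else if c = ',' ∧ d = 0 then cur :: fsplit cs d []
    else fsplit cs d (cur ++ [c])

-- indices (relative to full string) of top-level commas in cs, starting at position i, depth d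
def idxRec : List Char → Nat → Int → List Nat
  | [], _, _ => []
  | c :: cs, i, d =>
    if c = '<' then idxRec cs (i+1) (d+1)
    else if c = '>' then idxRec cs (i+1) (d-1)
    else if c = ',' ∧ d = 0 then i :: idxRec cs (i+1) d
    else idxRec cs (i+1) d

-- slicing pass as a direct recursion
def sliceRec (cs : List Char) : List Nat → Nat → List (List Char)
  | [], start =>
    let last := PySem.List.slice cs (some (start : Int)) none
    if last = [] then [] else [last]
  | i :: is, start => PySem.List.slice cs (some (start : Int)) (some (i : Int)) :: sliceRec cs is (i+1)

lemma A_loop (cs : List Char) (params : List (List Char)) (cur : List Char) (d : Int) :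
    (let st := cs.foldl
      (fun (st : List (List Char) × List Char × Int) c =>
        if c = '<' then (st.1, st.2.1 ++ [c], st.2.2 + 1)
        else if c = '>' then (st.1, st.2.1 ++ [c], st.2.2 - 1)
        else if c = ',' ∧ st.2.2 = 0 then (st.1 ++ [st.2.1], [], st.2.2)
        else (st.1, st.2.1 ++ [c], st.2.2))
      (params, cur, d)
     (if st.2.1 ≠ [] then st.1 ++ [st.2.1] else st.1)) = params ++ fsplit cs d cur := by
  induction cs generalizing params cur d with
  | nil =>
    simp only [List.foldl_nil, fsplit]
    by_cases h : cur = [] <;> simp [h]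
  | cons c cs ih =>
    simp only [List.foldl_cons, fsplit]
    by_cases h1 : c = '<'
    · simp only [if_pos h1]; exact ih params (cur ++ [c]) (d + 1)
    by_cases h2 : c = '>'
    · simp only [if_pos h2, if_neg h1]; exact ih params (cur ++ [c]) (d - 1)
    by_cases h3 : c = ',' ∧ d = 0
    · simp only [if_pos h3, if_neg h1, if_neg h2]
      rw [ih]; simp
    · simp only [if_neg h1, if_neg h2, if_neg h3]; exact ih params (cur ++ [c]) d

lemma B_idx (cs : List Char) (i : Nat) (d : Int) (acc : List Int) :
    ((PySem.List.enumerate cs (i : Int)).foldl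
      (fun (st : List Int × Int) (p : Int × Char) =>
        if p.2 = '<' then (st.1, st.2 + 1)
        else if p.2 = '>' then (st.1, st.2 - 1)
        else if p.2 = ',' ∧ st.2 = 0 then (st.1 ++ [p.1], st.2)
        else st)
      (acc, d)).1 = acc ++ (idxRec cs i d).map Int.ofNat := by
  induction cs generalizing i d acc with
  | nil => simp [PySem.List.enumerate_nil, idxRec]
  | cons c cs ih =>
    rw [PySem.List.enumerate_cons, List.foldl_cons]
    have hc : ((i : Int) + 1) = ((i + 1 : Nat) : Int) := by push_cast; ring
    simp only [idxRec]
    by_cases h1 : c = '<'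
    · simp only [if_pos h1, hc, ih]
    by_cases h2 : c = '>'
    · simp only [if_pos h2, if_neg h1, hc, ih]
    by_cases h3 : c = ',' ∧ d = 0
    · simp only [if_pos h3, if_neg h1, if_neg h2, hc, ih]
      simp
    · simp only [if_neg h1, if_neg h2, if_neg h3, hc, ih]

lemma B_slice (cs : List Char) (idxs : List Nat) (start : Nat) (acc : List (List Char)) :
    (let fin := (idxs.map Int.ofNat).foldl
      (fun (acc : List (List Char) × Int) i =>
        (acc.1 ++ [PySem.List.slice cs (some acc.2) (some i)], i + 1))
      (acc, (start : Int))
     let last := PySem.List.slice cs (some fin.2) none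
     (if last ≠ [] then fin.1 ++ [last] else fin.1)) = acc ++ sliceRec cs idxs start := by
  induction idxs generalizing acc start with
  | nil =>
    simp only [List.map_nil, List.foldl_nil, sliceRec]
    by_cases h : PySem.List.slice cs (some (start : Int)) none = []
    · rw [if_neg (not_not_intro h), if_pos h, List.append_nil]
    · rw [if_pos h, if_neg h]
  | cons i is ih =>
    have hc : (Int.ofNat i + 1) = ((i + 1 : Nat) : Int) := by
      show ((i : Int) + 1) = ((i + 1 : Nat) : Int); push_cast; ring
    rw [List.map_cons, List.foldl_cons]
    simp only [hc]
    rw [ih]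
    simp [sliceRec]

lemma fsplit_cur (cs : List Char) (d : Int) (cur : List Char) (h : cur ≠ []) :
    fsplit cs d cur = match fsplit cs d [] with
      | [] => [cur]
      | s :: t => (cur ++ s) :: t := by
  induction cs generalizing d cur with
  | nil => simp [fsplit, h]
  | cons c cs ih =>
    by_cases h1 : c = '<'
    · simp only [fsplit, if_pos h1, List.nil_append]
      rw [ih (d+1) (cur ++ [c]) (by simp), ih (d+1) [c] (by simp)]
      cases fsplit cs (d+1) [] <;> simp
    by_cases h2 : c = '>'
    · simp only [fsplit, if_pos h2, if_neg h1, List.nil_append]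
      rw [ih (d-1) (cur ++ [c]) (by simp), ih (d-1) [c] (by simp)]
      cases fsplit cs (d-1) [] <;> simp
    by_cases h3 : c = ',' ∧ d = 0
    · simp only [fsplit, if_pos h3, if_neg h1, if_neg h2, List.nil_append]
      simp
    · simp only [fsplit, if_neg h1, if_neg h2, if_neg h3, List.nil_append]
      rw [ih d (cur ++ [c]) (by simp), ih d [c] (by simp)]
      cases fsplit cs d [] <;> simp

lemma idxRec_mem (cs : List Char) (i : Nat) (d : Int) : ∀ j ∈ idxRec cs i d, i ≤ j := by
  induction cs generalizing i d with
  | nil => simp [idxRec]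
  | cons c cs ih =>
    intro j hj
    simp only [idxRec] at hj
    split_ifs at hj with h1 h2 h3
    · exact le_trans (Nat.le_succ i) (ih (i+1) (d+1) j hj)
    · exact le_trans (Nat.le_succ i) (ih (i+1) (d-1) j hj)
    · rcases List.mem_cons.mp hj with rfl | hj'
      · exact le_refl j
      · exact le_trans (Nat.le_succ i) (ih (i+1) d j hj')
    · exact le_trans (Nat.le_succ i) (ih (i+1) d j hj)

lemma sliceRec_shift (full : List Char) (L : List Nat) (off : Nat) (c : Char) (rest : List Char)
    (hd : full.drop off = c :: rest) (hL : ∀ j ∈ L, off + 1 ≤ j) :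
    sliceRec full L off = match sliceRec full L (off + 1) with
      | [] => [[c]]
      | s :: t => (c :: s) :: t := by
  have hrest : full.drop (off + 1) = rest := by
    rw [← List.tail_drop, hd]; rfl
  cases L with
  | nil =>
    simp only [sliceRec]
    rw [PySem.List.slice_from_natCast, PySem.List.slice_from_natCast, hd, hrest]
    cases rest <;> simp
  | cons i is =>
    have hoi : off + 1 ≤ i := hL i (List.mem_cons_self)
    have hsl : PySem.List.slice full (some ((off : Nat) : Int)) (some ((i : Nat) : Int))
        = c :: PySem.List.slice full (some ((off + 1 : Nat) : Int)) (some ((i : Nat) : Int)) := by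
      rw [PySem.List.slice_natCast, PySem.List.slice_natCast, hd, hrest,
        show i - off = (i - (off + 1)) + 1 by omega, List.take_succ_cons]
    simp only [sliceRec]
    rw [hsl]

lemma main_lemma (cs full : List Char) (off : Nat) (d : Int) (h : full.drop off = cs) :
    sliceRec full (idxRec cs off d) off = fsplit cs d [] := by
  induction cs generalizing off d with
  | nil =>
    simp only [idxRec, sliceRec, fsplit]
    rw [PySem.List.slice_from_natCast, h]
    simp
  | cons c cs ih =>
    have hd1 : full.drop (off + 1) = cs := by rw [← List.tail_drop, h]; rfl
    simp only [idxRec, fsplit]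
    by_cases h1 : c = '<'
    · simp only [if_pos h1, List.nil_append]
      rw [sliceRec_shift full _ off c cs h (idxRec_mem cs (off+1) (d+1)), ih (off+1) (d+1) hd1,
        fsplit_cur cs (d+1) [c] (by simp)]
      cases fsplit cs (d+1) [] <;> simp
    by_cases h2 : c = '>'
    · simp only [if_pos h2, if_neg h1, List.nil_append]
      rw [sliceRec_shift full _ off c cs h (idxRec_mem cs (off+1) (d-1)), ih (off+1) (d-1) hd1,
        fsplit_cur cs (d-1) [c] (by simp)]
      cases fsplit cs (d-1) [] <;> simp
    by_cases h3 : c = ',' ∧ d = 0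
    · simp only [if_pos h3, if_neg h1, if_neg h2]
      simp only [sliceRec]
      rw [PySem.List.slice_natCast, Nat.sub_self, List.take_zero, ih (off+1) d hd1]
    · simp only [if_neg h1, if_neg h2, if_neg h3, List.nil_append]
      rw [sliceRec_shift full _ off c cs h (idxRec_mem cs (off+1) d), ih (off+1) d hd1,
        fsplit_cur cs d [c] (by simp)]
      cases fsplit cs d [] <;> simp

-- ===== VERDICT (by name: the statement is the Claim_ definition above) =====
theorem split_parameters_py_spec : Claim_equal_split_parameters_py := by
  intro s _
  unfold Spec_split_parameters_py split_parameters_py split_parameters_py_alt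
  dsimp only []
  have hidx := B_idx s.toList 0 0 []
  simp only [Nat.cast_zero, List.nil_append] at hidx
  rw [hidx]
  have hsl := B_slice s.toList (idxRec s.toList 0 0) 0 []
  simp only [Nat.cast_zero, List.nil_append] at hsl
  rw [hsl]
  rw [main_lemma s.toList s.toList 0 0 (by simp)]
  rw [A_loop s.toList [] [] 0]
  rfl
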